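-- pv_equiv track=rewrite | github.com/maxipdev/Introduccion-a-la-programacion-1-UBA | Guia7.py | pos_secuencias_mas_larga
-- ===== SOURCE A (Python) =====
-- def pos_secuencias_mas_larga(lista):
--     mejores_secuencias = []
--     contador = 1
--     posicion = 0
--     for i in range(1 ,len(lista)):
--         if lista[i - 1] < lista[i]:
--             contador +=1
--         else:
--             if contador > 1:
--                 mejores_secuencias.append((posicion, contador)) # guardo los datos para poder reinciar y despues comparar
--             contador = 0
--             posicion = i
--
--     # Guardo la ultima secuencia si termino bien
--     if contador > 1:
--         mejores_secuencias.append((posicion, contador))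
--
--     # Compro cada elemento
--     nueva_posicion = 0
--     mas_elementos = 0
--     for k in mejores_secuencias:
--         if mas_elementos < k[1]:
--             nueva_posicion = k[0]
--             mas_elementos = k[1]
--     return nueva_posicion
-- ===== SOURCE B (Python) =====
-- def pos_secuencias_mas_larga(lista):
--     contador = 1
--     posicion = 0
--     best_pos = 0
--     best_len = 0
--     for i in range(1, len(lista)):
--         if lista[i - 1] < lista[i]:
--             contador += 1
--         else:
--             if contador > 1 and best_len < contador:
--                 best_pos = posicion
--                 best_len = contador
--             contador = 0
--             posicion = i
--     if contador > 1 and best_len < contador: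
--         best_pos = posicion
--         best_len = contador
--     return best_pos
-- ===== Notes on version B (the rewrite author's own statement) =====
-- stated objective: simpler
-- what changed: Fuses A's two passes into one: instead of accumulating a list of (position, length) candidates and scanning it afterwards, B maintains only the running best (best_pos, best_len) directly in the single loop, eliminating the intermediate list.
import Mathlib
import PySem

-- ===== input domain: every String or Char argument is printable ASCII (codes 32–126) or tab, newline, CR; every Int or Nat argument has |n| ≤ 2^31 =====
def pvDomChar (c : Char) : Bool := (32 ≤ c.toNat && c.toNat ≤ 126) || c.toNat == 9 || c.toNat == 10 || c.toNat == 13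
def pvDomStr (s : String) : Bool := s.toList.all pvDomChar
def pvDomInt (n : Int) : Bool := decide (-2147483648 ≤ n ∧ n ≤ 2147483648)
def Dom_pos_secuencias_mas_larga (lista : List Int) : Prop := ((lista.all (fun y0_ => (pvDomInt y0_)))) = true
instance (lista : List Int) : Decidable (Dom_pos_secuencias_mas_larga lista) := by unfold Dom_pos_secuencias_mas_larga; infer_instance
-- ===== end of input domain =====

-- B fuses A's two passes into one, maintaining only the running best instead of a candidate list; return values provably equal.

-- ===== PORT A =====
-- state: (mejores_secuencias, contador, posicion)
def pvStepA (lista : List Int) (st : List (Int × Int) × Int × Int) (i : Int) :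
    List (Int × Int) × Int × Int :=
  if PySem.List.pyGetD lista (i - 1) 0 < PySem.List.pyGetD lista i 0 then
    (st.1, st.2.1 + 1, st.2.2)
  else
    ((if st.2.1 > 1 then st.1 ++ [(st.2.2, st.2.1)] else st.1), 0, i)

-- second loop: (nueva_posicion, mas_elementos)
def pvStep2 (acc : Int × Int) (k : Int × Int) : Int × Int :=
  if acc.2 < k.2 then k else acc

def pos_secuencias_mas_larga (lista : List Int) : Int :=
  let s := (PySem.List.pyRange 1 (lista.length : Int) 1).foldl (pvStepA lista) ([], 1, 0)
  let ms := if s.2.1 > 1 then s.1 ++ [(s.2.2, s.2.1)] else s.1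
  (ms.foldl pvStep2 (0, 0)).1

-- ===== PORT B =====
-- state: (contador, posicion, best_pos, best_len)
def pvStepB (lista : List Int) (st : Int × Int × Int × Int) (i : Int) :
    Int × Int × Int × Int :=
  if PySem.List.pyGetD lista (i - 1) 0 < PySem.List.pyGetD lista i 0 then
    (st.1 + 1, st.2.1, st.2.2)
  else
    (0, i, if st.1 > 1 ∧ st.2.2.2 < st.1 then (st.2.1, st.1) else st.2.2)

def pos_secuencias_mas_larga_alt (lista : List Int) : Int :=
  let s := (PySem.List.pyRange 1 (lista.length : Int) 1).foldl (pvStepB lista) (1, 0, 0, 0)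
  (if s.1 > 1 ∧ s.2.2.2 < s.1 then (s.2.1, s.1) else s.2.2).1

-- ===== PRECONDITION & SPEC =====
def Spec_pos_secuencias_mas_larga (lista : List Int) (out : Int) : Prop := out = pos_secuencias_mas_larga_alt lista
instance (lista : List Int) (out : Int) : Decidable (Spec_pos_secuencias_mas_larga lista out) := by unfold Spec_pos_secuencias_mas_larga; infer_instance

-- ===== CLAIM (what is proved, stated in full; the proofs are below) =====
def Claim_equal_pos_secuencias_mas_larga : Prop := ∀ (lista : List Int), Dom_pos_secuencias_mas_larga lista → Spec_pos_secuencias_mas_larga lista (pos_secuencias_mas_larga lista)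

-- ===== LEMMAS AND PROOFS =====

-- B's best pair equals the second loop of A run over the candidate list accumulated so far,
-- assuming A appends only entries with contador > 1 (which it does).
lemma pvStep2_append (ms : List (Int × Int)) (x : Int × Int) :
    (ms ++ [x]).foldl pvStep2 (0, 0) = pvStep2 (ms.foldl pvStep2 (0, 0)) x := by
  simp [List.foldl_append]

lemma pvLoop_rel (lista : List Int) (is : List Int) :
    ∀ (ms : List (Int × Int)) (c p : Int),
      is.foldl (pvStepB lista) (c, p, ms.foldl pvStep2 (0, 0)) =
        (let sA := is.foldl (pvStepA lista) (ms, c, p)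
         (sA.2.1, sA.2.2, sA.1.foldl pvStep2 (0, 0))) := by
  induction is with
  | nil => intro ms c p; rfl
  | cons i is ih =>
    intro ms c p
    simp only [List.foldl_cons]
    by_cases hlt : PySem.List.pyGetD lista (i - 1) 0 < PySem.List.pyGetD lista i 0
    · simp only [pvStepA, pvStepB, hlt, if_pos]
      exact ih ms (c + 1) p
    · simp only [pvStepA, pvStepB, hlt, if_false]
      by_cases hc : c > 1
      · have hbest : (if c > 1 ∧ (ms.foldl pvStep2 (0, 0)).2 < c
              then (p, c) else ms.foldl pvStep2 (0, 0)) =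
            (ms ++ [(p, c)]).foldl pvStep2 (0, 0) := by
          rw [pvStep2_append]
          by_cases hb : (ms.foldl pvStep2 (0, 0)).2 < c
          · simp [pvStep2, hc, hb]
          · simp [pvStep2, hc, hb]
        rw [hbest]
        simpa [hc] using ih (ms ++ [(p, c)]) 0 i
      · have hbest : (if c > 1 ∧ (ms.foldl pvStep2 (0, 0)).2 < c
              then (p, c) else ms.foldl pvStep2 (0, 0)) = ms.foldl pvStep2 (0, 0) := by
          simp [hc]
        rw [hbest]
        simpa [hc] using ih ms 0 i

-- ===== VERDICT (by name: the statement is the Claim_ definition above) =====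
theorem pos_secuencias_mas_larga_spec : Claim_equal_pos_secuencias_mas_larga := by
  intro lista _
  unfold Spec_pos_secuencias_mas_larga pos_secuencias_mas_larga pos_secuencias_mas_larga_alt
  have h := pvLoop_rel lista (PySem.List.pyRange 1 (lista.length : Int) 1) [] 1 0
  simp only [List.foldl_nil] at h
  rw [h]
  set sA := (PySem.List.pyRange 1 (lista.length : Int) 1).foldl (pvStepA lista) ([], 1, 0) with hsA
  by_cases hc : sA.2.1 > 1
  · by_cases hb : (sA.1.foldl pvStep2 (0, 0)).2 < sA.2.1
    · simp [hc, hb, pvStep2]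
    · simp [hc, hb, pvStep2]
  · simp [hc]
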